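-- pv_equiv track=rewrite | github.com/edeyow/awp-validator-fleet | crawler/platforms/wikipedia.py | _normalize_protection_level
-- ===== SOURCE A (Python) =====
-- def _normalize_protection_level(levels: list[str]) -> str:
--     normalized_levels = {str(level).strip().lower() for level in levels if str(level).strip()}
--     if not normalized_levels:
--         return "unprotected"
--     if normalized_levels & {"sysop", "templateeditor", "extendedconfirmed"}:
--         return "fully-protected"
--     if normalized_levels & {"autoconfirmed", "editsemiprotected"}:
--         return "semi-protected"
--     return "fully-protected"
-- ===== SOURCE B (Python) =====
-- def _normalize_protection_level(levels: list[str]) -> str: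
--     full = {"sysop", "templateeditor", "extendedconfirmed"}
--     semi = {"autoconfirmed", "editsemiprotected"}
--     saw_any = False
--     saw_semi = False
--     for level in levels:
--         s = str(level).strip().lower()
--         if not s:
--             continue
--         saw_any = True
--         if s in full:
--             return "fully-protected"
--         if s in semi:
--             saw_semi = True
--     if not saw_any:
--         return "unprotected"
--     return "semi-protected" if saw_semi else "fully-protected"
-- ===== Notes on version B (the rewrite author's own statement) =====
-- stated objective: simpler
-- what changed: Replaces the set comprehension plus two set intersections with a single streaming pass that keeps two flags, returns 'fully-protected' at the first full-protection level, and never materializes the normalized set.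
import Mathlib
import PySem

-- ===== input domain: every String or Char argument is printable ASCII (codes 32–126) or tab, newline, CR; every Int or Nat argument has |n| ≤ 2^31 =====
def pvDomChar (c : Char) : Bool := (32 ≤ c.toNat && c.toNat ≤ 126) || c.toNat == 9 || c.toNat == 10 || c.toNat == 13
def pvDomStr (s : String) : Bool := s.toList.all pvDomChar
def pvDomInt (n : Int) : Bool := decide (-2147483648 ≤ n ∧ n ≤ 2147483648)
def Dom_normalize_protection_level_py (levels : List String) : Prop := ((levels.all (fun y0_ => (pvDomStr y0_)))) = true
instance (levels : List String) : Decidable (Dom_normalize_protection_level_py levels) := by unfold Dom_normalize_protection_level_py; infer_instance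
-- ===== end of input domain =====

-- B replaces A's set comprehension + two set intersections by one streaming pass with two flags
-- and an early return on the first full-protection level (objective: simpler).

-- ===== PORT A =====
def normalize_protection_level_py (levels : List String) : String :=
  let normalized_levels : PySem.Set String :=
    PySem.Set.ofList ((levels.filter (fun level => !(PySem.Str.strip level == ""))).map
      (fun level => PySem.Str.lower (PySem.Str.strip level)))
  if normalized_levels.isEmpty then "unprotected"
  else if !(PySem.Set.inter normalized_levels
      (PySem.Set.ofList ["sysop", "templateeditor", "extendedconfirmed"])).isEmpty then "fully-protected"
  else if !(PySem.Set.inter normalized_levels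
      (PySem.Set.ofList ["autoconfirmed", "editsemiprotected"])).isEmpty then "semi-protected"
  else "fully-protected"

-- ===== PORT B =====
def pvFull : List String := ["sysop", "templateeditor", "extendedconfirmed"]
def pvSemi : List String := ["autoconfirmed", "editsemiprotected"]

def pvAltLoop (levels : List String) (sawAny sawSemi : Bool) : String :=
  match levels with
  | [] => if !sawAny then "unprotected" else if sawSemi then "semi-protected" else "fully-protected"
  | level :: rest =>
    let s := PySem.Str.lower (PySem.Str.strip level)
    if s == "" then pvAltLoop rest sawAny sawSemi
    else if pvFull.contains s then "fully-protected"
    else if pvSemi.contains s then pvAltLoop rest true true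
    else pvAltLoop rest true sawSemi

def normalize_protection_level_py_alt (levels : List String) : String :=
  pvAltLoop levels false false

-- ===== PRECONDITION & SPEC =====
def Spec_normalize_protection_level_py (levels : List String) (out : String) : Prop := out = normalize_protection_level_py_alt levels
instance (levels : List String) (out : String) : Decidable (Spec_normalize_protection_level_py levels out) := by unfold Spec_normalize_protection_level_py; infer_instance

-- ===== CLAIM (what is proved, stated in full; the proofs are below) =====
def Claim_equal_normalize_protection_level_py : Prop := ∀ (levels : List String), Dom_normalize_protection_level_py levels → Spec_normalize_protection_level_py levels (normalize_protection_level_py levels)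

-- ===== LEMMAS AND PROOFS =====

-- the normalized non-empty levels, in list order
def pvNs (levels : List String) : List String :=
  (levels.map (fun level => PySem.Str.lower (PySem.Str.strip level))).filter (fun s => !(s == ""))

theorem pv_lower_eq_empty (t : String) : (PySem.Str.lower t == "") = (t == "") := by
  have h : (PySem.Str.lower t).toList = t.toList.map PySem.Chars.lowerChar := by
    simp [PySem.Str.toList_lower, PySem.Chars.lower]
  rcases hb : (t == "") with _ | _
  · have ht : t ≠ "" := by simpa using hb
    have ht' : t.toList ≠ [] := fun hn => ht (String.toList_eq_nil_iff.mp hn)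
    have hl : (PySem.Str.lower t).toList ≠ [] := by
      rw [h]; simpa using ht'
    have : PySem.Str.lower t ≠ "" := fun hn => hl (by simp [hn])
    simpa using this
  · have ht : t = "" := by simpa using hb
    subst ht
    have hl : (PySem.Str.lower "").toList = [] := by simpa using h
    have : PySem.Str.lower "" = "" := String.toList_eq_nil_iff.mp hl
    simpa using this

theorem pv_ns_eq (levels : List String) :
    (levels.filter (fun level => !(PySem.Str.strip level == ""))).map
      (fun level => PySem.Str.lower (PySem.Str.strip level)) = pvNs levels := by
  unfold pvNs
  rw [List.filter_map]
  have h : levels.filter (fun level => !(PySem.Str.strip level == "")) =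
      levels.filter ((fun s => !(s == "")) ∘ (fun level => PySem.Str.lower (PySem.Str.strip level))) :=
    List.filter_congr (fun l _ => by
      simp only [Function.comp_apply]
      rw [pv_lower_eq_empty])
  rw [h]

theorem pv_ofList_isEmpty {α : Type} [BEq α] [LawfulBEq α] (xs : List α) :
    (PySem.Set.ofList xs).isEmpty = xs.isEmpty := by
  cases xs with
  | nil => rfl
  | cons a l =>
    have ha : a ∈ PySem.Set.ofList (a :: l) := (PySem.Set.mem_ofList _ _).mpr (by simp)
    rcases hs : PySem.Set.ofList (a :: l) with _ | ⟨b, s⟩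
    · rw [hs] at ha; simp at ha
    · simp

theorem pv_inter_isEmpty {α : Type} [BEq α] [LawfulBEq α] (xs t : List α) :
    (PySem.Set.inter (PySem.Set.ofList xs) t).isEmpty = !(xs.any (fun x => t.contains x)) := by
  rcases h : xs.any (fun x => t.contains x) with _ | _
  · simp only [List.any_eq_false] at h
    simp only [Bool.not_false, PySem.Set.inter, List.isEmpty_iff, List.filter_eq_nil_iff]
    intro x hx
    have hx' := h x ((PySem.Set.mem_ofList _ _).mp hx)
    simpa [PySem.Set.contains] using hx'
  · simp only [List.any_eq_true] at h
    obtain ⟨x, hx, hc⟩ := h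
    have hxm : x ∈ List.filter (fun y => PySem.Set.contains t y) (PySem.Set.ofList xs) := by
      refine List.mem_filter.mpr ⟨(PySem.Set.mem_ofList _ _).mpr hx, ?_⟩
      simpa [PySem.Set.contains] using hc
    simp only [Bool.not_true, PySem.Set.inter, List.isEmpty_eq_false_iff]
    exact List.ne_nil_of_mem hxm

theorem pv_full_lit : PySem.Set.ofList ["sysop", "templateeditor", "extendedconfirmed"] = pvFull := by decide
theorem pv_semi_lit : PySem.Set.ofList ["autoconfirmed", "editsemiprotected"] = pvSemi := by decide

theorem pvA_char (levels : List String) :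
    normalize_protection_level_py levels =
      (if (pvNs levels).isEmpty then "unprotected"
       else if (pvNs levels).any (fun s => pvFull.contains s) then "fully-protected"
       else if (pvNs levels).any (fun s => pvSemi.contains s) then "semi-protected"
       else "fully-protected") := by
  simp only [normalize_protection_level_py, pv_ns_eq, pv_full_lit, pv_semi_lit,
    pv_ofList_isEmpty, pv_inter_isEmpty]
  simp

theorem pvLoop_spec (levels : List String) : ∀ (sawAny sawSemi : Bool),
    pvAltLoop levels sawAny sawSemi =
      (if (pvNs levels).any (fun s => pvFull.contains s) then "fully-protected"
       else if !sawAny && (pvNs levels).isEmpty then "unprotected"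
       else if sawSemi || (pvNs levels).any (fun s => pvSemi.contains s) then "semi-protected"
       else "fully-protected") := by
  induction levels with
  | nil => intro sawAny sawSemi; cases sawAny <;> cases sawSemi <;> simp [pvAltLoop, pvNs]
  | cons level rest ih =>
    intro sawAny sawSemi
    have hns : pvNs (level :: rest) =
        (if !(PySem.Str.lower (PySem.Str.strip level) == "")
         then [PySem.Str.lower (PySem.Str.strip level)] else []) ++ pvNs rest := by
      simp only [pvNs, List.map_cons, List.filter_cons]
      split <;> simp_all
    rw [pvAltLoop]
    set s := PySem.Str.lower (PySem.Str.strip level) with hs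
    by_cases he : (s == "") = true
    · rw [if_pos he, ih]
      rw [hns, he]
      simp
    · have he' : (s == "") = false := by simpa using he
      rw [if_neg (by simp [he'])]
      rw [hns, he']
      simp only [Bool.not_false]
      by_cases hf : pvFull.contains s = true
      · have h1 : s ∈ pvFull := by simpa [List.contains_eq_mem] using hf
        rw [if_pos hf]
        simp [h1]
      · have h1 : s ∉ pvFull := by simpa [List.contains_eq_mem] using hf
        rw [if_neg hf]
        by_cases hsm : pvSemi.contains s = true
        · have h2 : s ∈ pvSemi := by simpa [List.contains_eq_mem] using hsm
          rw [if_pos hsm, ih]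
          simp [h1, h2]
        · have h2 : s ∉ pvSemi := by simpa [List.contains_eq_mem] using hsm
          rw [if_neg hsm, ih]
          simp [h1, h2]

-- ===== VERDICT (by name: the statement is the Claim_ definition above) =====
theorem normalize_protection_level_py_spec : Claim_equal_normalize_protection_level_py := by
  unfold Claim_equal_normalize_protection_level_py Spec_normalize_protection_level_py
  intro levels _
  rw [pvA_char]
  unfold normalize_protection_level_py_alt
  rw [pvLoop_spec]
  rcases h : pvNs levels with _ | ⟨a, l⟩
  · simp
  · simp only [List.isEmpty_cons]
    by_cases hf : ((a :: l).any (fun s => pvFull.contains s)) = true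
    · simp only [hf]
      simp
    · simp only [Bool.not_eq_true] at hf
      simp only [hf]
      simp
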